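-- pv_equiv track=rewrite | github.com/michimani/Project-Euler-Solutions | python/0019.py | get_all_day_in_a_year
-- ===== SOURCE A (Python) =====
-- DAYS = [1, 2, 3, 4, 5, 6, 7]  # from Monday to Sunday
--
-- MONTH_DAY_CNT_LIST = [31, 28, 31, 30, 31, 30, 31, 31, 30, 31, 30, 31]
--
-- MONTH_DAY_CNT_LIST_IN_LEAP = [31, 29, 31, 30, 31, 30, 31, 31, 30, 31, 30, 31]
--
-- def get_all_day_in_a_year(year, first_day) -> list[int]:
--     all_day: list[int] = []
--     day_cnt = sum(MONTH_DAY_CNT_LIST)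
--     if is_leap(year) is True:
--         day_cnt = sum(MONTH_DAY_CNT_LIST_IN_LEAP)
--
--     day_idx = first_day - 1
--     while len(all_day) < day_cnt:
--         if (day_idx + 1) not in DAYS:
--             day_idx = 0
--
--         all_day.append(DAYS[day_idx])
--         day_idx += 1
--
--     return all_day
--
-- def is_leap(year):
--     if (year % 400 != 0 and year % 100 == 0) or year % 4 != 0:
--         return False
--     else:
--         return True
-- ===== SOURCE B (Python) =====
-- DAYS = [1, 2, 3, 4, 5, 6, 7]  # from Monday to Sunday
--
-- def is_leap(year):
--     if (year % 400 != 0 and year % 100 == 0) or year % 4 != 0: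
--         return False
--     else:
--         return True
--
-- def get_all_day_in_a_year(year, first_day) -> list[int]:
--     day_cnt = 366 if is_leap(year) else 365
--     start = first_day - 1 if 1 <= first_day <= 7 else 0
--     week = DAYS[start:] + DAYS[:start]  # the week cycle rotated to the start day
--     return (week * 53)[:day_cnt]        # 53 whole weeks cover a year; trim to length
-- ===== Notes on version B (the rewrite author's own statement) =====
-- stated objective: alternative
-- what changed: Instead of generating days one by one with a stateful index-reset loop, B builds the rotated week block DAYS[start:]+DAYS[:start] once, replicates it 53 times and slices the result to the year's length (365/366 from the leap test directly, not by summing month lists).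
import Mathlib
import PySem

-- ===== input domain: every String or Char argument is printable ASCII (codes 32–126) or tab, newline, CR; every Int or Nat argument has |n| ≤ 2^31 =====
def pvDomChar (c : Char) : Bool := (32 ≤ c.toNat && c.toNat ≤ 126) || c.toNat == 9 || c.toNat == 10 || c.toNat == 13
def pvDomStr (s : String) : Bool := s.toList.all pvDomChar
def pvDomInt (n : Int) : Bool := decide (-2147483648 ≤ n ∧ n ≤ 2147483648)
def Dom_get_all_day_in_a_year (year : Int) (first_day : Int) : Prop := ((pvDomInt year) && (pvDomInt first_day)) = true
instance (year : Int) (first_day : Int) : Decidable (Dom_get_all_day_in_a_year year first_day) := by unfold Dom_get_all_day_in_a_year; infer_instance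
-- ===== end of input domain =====

-- B replaces A's per-day stateful index-reset loop by building the rotated week block
-- once, replicating it 53 times and slicing to the year's length; equivalent, no speed claim.

-- ===== PORT A =====
def pyDAYS : List Int := [1, 2, 3, 4, 5, 6, 7]

def pyMONTH_DAY_CNT_LIST : List Int := [31, 28, 31, 30, 31, 30, 31, 31, 30, 31, 30, 31]

def pyMONTH_DAY_CNT_LIST_IN_LEAP : List Int := [31, 29, 31, 30, 31, 30, 31, 31, 30, 31, 30, 31]

def is_leap (year : Int) : Bool :=
  if (PySem.Int.mod year 400 ≠ 0 ∧ PySem.Int.mod year 100 = 0) ∨ PySem.Int.mod year 4 ≠ 0 then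
    false
  else
    true

-- the while loop of A: fuel = day_cnt - len(all_day); the guard ensures the
-- index is in range, so the pyGet? default 0 is never used
def pyLoopA : Nat → Int → List Int → List Int
  | 0, _, acc => acc.reverse
  | n + 1, day_idx, acc =>
    let day_idx := if pyDAYS.contains (day_idx + 1) then day_idx else 0
    pyLoopA n (day_idx + 1) ((PySem.List.pyGet? pyDAYS day_idx).getD 0 :: acc)

def get_all_day_in_a_year (year : Int) (first_day : Int) : List Int :=
  let day_cnt := pyMONTH_DAY_CNT_LIST.sum
  let day_cnt := if is_leap year = true then pyMONTH_DAY_CNT_LIST_IN_LEAP.sum else day_cnt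
  pyLoopA day_cnt.toNat (first_day - 1) []

-- ===== PORT B =====
def pyDAYS_alt : List Int := [1, 2, 3, 4, 5, 6, 7]

def is_leap_alt (year : Int) : Bool :=
  if (PySem.Int.mod year 400 ≠ 0 ∧ PySem.Int.mod year 100 = 0) ∨ PySem.Int.mod year 4 ≠ 0 then
    false
  else
    true

def get_all_day_in_a_year_alt (year : Int) (first_day : Int) : List Int :=
  let day_cnt : Int := if is_leap_alt year then 366 else 365
  let start : Int := if 1 ≤ first_day ∧ first_day ≤ 7 then first_day - 1 else 0
  let week := PySem.List.slice pyDAYS_alt (some start) none ++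
              PySem.List.slice pyDAYS_alt none (some start)
  PySem.List.slice ((List.replicate 53 week).flatten) none (some day_cnt)

-- ===== PRECONDITION & SPEC =====
def Spec_get_all_day_in_a_year (year : Int) (first_day : Int) (out : List Int) : Prop := out = get_all_day_in_a_year_alt year first_day
instance (year : Int) (first_day : Int) (out : List Int) : Decidable (Spec_get_all_day_in_a_year year first_day out) := by unfold Spec_get_all_day_in_a_year; infer_instance

-- ===== CLAIM (what is proved, stated in full; the proofs are below) =====
def Claim_equal_get_all_day_in_a_year : Prop := ∀ (year : Int) (first_day : Int), Dom_get_all_day_in_a_year year first_day → Spec_get_all_day_in_a_year year first_day (get_all_day_in_a_year year first_day)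

-- ===== LEMMAS AND PROOFS =====

theorem pyDAYS_contains_iff (k : Int) : pyDAYS.contains k = true ↔ 1 ≤ k ∧ k ≤ 7 := by
  simp [pyDAYS, List.contains_eq_mem, List.mem_cons]
  omega

theorem pyDAYS_get (j : Int) (h0 : 0 ≤ j) (h6 : j ≤ 6) :
    (PySem.List.pyGet? pyDAYS j).getD 0 = j + 1 := by
  interval_cases j <;> decide

-- A's loop computes the closed-form modular sequence from the normalised start index
theorem pyLoopA_eq (n : Nat) : ∀ (idx : Int) (acc : List Int),
    pyLoopA n idx acc =
      acc.reverse ++ (List.range n).map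
        (fun i : Nat => PySem.Int.mod ((if 0 ≤ idx ∧ idx ≤ 6 then idx else 0) + (i : Int)) 7 + 1) := by
  induction n with
  | zero => intro idx acc; simp [pyLoopA]
  | succ n ih =>
    intro idx acc
    set j : Int := if 0 ≤ idx ∧ idx ≤ 6 then idx else 0 with hj
    have hj0 : 0 ≤ j := by rw [hj]; split <;> omega
    have hj6 : j ≤ 6 := by rw [hj]; split <;> omega
    have hd : (if pyDAYS.contains (idx + 1) then idx else 0) = j := by
      by_cases h : 0 ≤ idx ∧ idx ≤ 6
      · have hc : pyDAYS.contains (idx + 1) = true :=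
          (pyDAYS_contains_iff (idx + 1)).2 ⟨by omega, by omega⟩
        rw [hc, if_pos rfl, hj, if_pos h]
      · have hc : pyDAYS.contains (idx + 1) = false := by
          rw [Bool.eq_false_iff]
          intro hc
          have := (pyDAYS_contains_iff (idx + 1)).1 hc
          exact h ⟨by omega, by omega⟩
        rw [hc, if_neg (by simp), hj, if_neg h]
    have hstep : pyLoopA (n + 1) idx acc = pyLoopA n (j + 1) ((j + 1) :: acc) := by
      show (let d := if pyDAYS.contains (idx + 1) then idx else 0;
            pyLoopA n (d + 1) ((PySem.List.pyGet? pyDAYS d).getD 0 :: acc)) = _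
      simp only [hd, pyDAYS_get j hj0 hj6]
    rw [hstep, ih (j + 1) ((j + 1) :: acc), List.range_succ_eq_map]
    simp only [List.map_cons, List.map_map, List.reverse_cons, List.append_assoc,
      List.singleton_append]
    congr 1
    congr 1
    · rw [PySem.Int.mod_eq_emod_of_pos (by norm_num : (0:Int) < 7)]
      push_cast
      omega
    · apply List.map_congr_left
      intro i _
      simp only [Function.comp_apply]
      rw [PySem.Int.mod_eq_emod_of_pos (by norm_num : (0:Int) < 7),
          PySem.Int.mod_eq_emod_of_pos (by norm_num : (0:Int) < 7)]
      push_cast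
      split <;> omega

-- the rotated week block, abbreviated for the lemmas below
def pvWeek (s : Int) : List Int :=
  PySem.List.slice pyDAYS_alt (some s) none ++ PySem.List.slice pyDAYS_alt none (some s)

theorem pvWeek_length (s : Int) (h0 : 0 ≤ s) (h6 : s ≤ 6) : (pvWeek s).length = 7 := by
  interval_cases s <;> decide

theorem pvWeek_getD (s : Int) (h0 : 0 ≤ s) (h6 : s ≤ 6) (i : Nat) :
    (pvWeek s).getD (i % 7) 0 = PySem.Int.mod (s + (i : Int)) 7 + 1 := by
  rw [PySem.Int.mod_eq_emod_of_pos (by norm_num : (0:Int) < 7)]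
  have h1 : (s + (i : Int)) % 7 = (s + ((i % 7 : Nat) : Int)) % 7 := by omega
  rw [h1]
  have hj : i % 7 < 7 := Nat.mod_lt _ (by omega)
  set j := i % 7 with hjdef
  clear_value j
  interval_cases s <;> interval_cases j <;> decide

-- flattening k copies of a length-7 block is the modular-index table
theorem flatten_replicate_eq (w : List Int) (hw : w.length = 7) (k : Nat) :
    (List.replicate k w).flatten = (List.range (7 * k)).map (fun i => w.getD (i % 7) 0) := by
  induction k with
  | zero => simp
  | succ k ih =>
    have hsplit : 7 * (k + 1) = 7 + 7 * k := by ring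
    rw [List.replicate_succ, List.flatten_cons, ih, hsplit, List.range_add, List.map_append,
      List.map_map]
    congr 1
    · apply List.ext_getElem
      · simp [hw]
      · intro i hi _
        have hi7 : i < 7 := by simpa [hw] using hi
        simp only [List.getElem_map, List.getElem_range, Nat.mod_eq_of_lt hi7]
        exact (List.getD_eq_getElem _ _ (hw ▸ hi7)).symm
    · apply List.map_congr_left
      intro i _
      simp [Nat.add_mod_left]

-- ===== VERDICT (by name: the statement is the Claim_ definition above) =====
theorem get_all_day_in_a_year_spec : Claim_equal_get_all_day_in_a_year := by
  intro year first_day _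
  unfold Spec_get_all_day_in_a_year get_all_day_in_a_year get_all_day_in_a_year_alt
  have hleap : is_leap_alt year = is_leap year := rfl
  rw [hleap]
  set s : Int := if 1 ≤ first_day ∧ first_day ≤ 7 then first_day - 1 else 0 with hs
  have hs0 : 0 ≤ s := by rw [hs]; split <;> omega
  have hs6 : s ≤ 6 := by rw [hs]; split <;> omega
  have hstart : (if 0 ≤ first_day - 1 ∧ first_day - 1 ≤ 6 then first_day - 1 else 0) = s := by
    rw [hs]
    by_cases h : 1 ≤ first_day ∧ first_day ≤ 7
    · rw [if_pos (by omega), if_pos h]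
    · rw [if_neg (by omega), if_neg h]
  have key : ∀ n : Nat, n ≤ 371 →
      (List.range n).map (fun i : Nat => PySem.Int.mod (s + (i : Int)) 7 + 1) =
      PySem.List.slice ((List.replicate 53 (pvWeek s)).flatten) none (some (n : Int)) := by
    intro n hn
    rw [PySem.List.slice_to _ (by positivity), Int.toNat_natCast,
      flatten_replicate_eq (pvWeek s) (pvWeek_length s hs0 hs6) 53,
      ← List.map_take, List.take_range]
    rw [Nat.min_eq_left hn]
    apply List.map_congr_left
    intro i _
    rw [pvWeek_getD s hs0 hs6 i]
  by_cases hl : is_leap year = true <;>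
    simp only [hl, if_true, if_false, Bool.false_eq_true, pyLoopA_eq, hstart,
      List.reverse_nil, List.nil_append]
  · exact (show pyMONTH_DAY_CNT_LIST_IN_LEAP.sum.toNat = 366 from rfl) ▸ key 366 (by omega)
  · exact (show pyMONTH_DAY_CNT_LIST.sum.toNat = 365 from rfl) ▸ key 365 (by omega)
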